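-- pv_equiv track=rewrite | github.com/seung-woo-ryu/AlgorithmTest | programmers/[Level-3]/최고의집합.py | solution
-- ===== SOURCE A (Python) =====
-- def solution(n, s):
--     if s < n:
--         return [-1]
--     answer = []
--
--     while n:
--         mok = s//n
--         answer.append(mok)
--         s -= mok
--         n -= 1
--
--     return answer
-- ===== SOURCE B (Python) =====
-- def solution(n, s):
--     if s < n:
--         return [-1]
--     if n == 0:
--         return []
--     q, r = divmod(s, n)
--     return [q] * (n - r) + [q + 1] * r
-- ===== Notes on version B (the rewrite author's own statement) =====
-- stated objective: simpler
-- what changed: B replaces the n-step while-loop that recomputes s//n each iteration by one divmod and direct construction of the two constant runs [q]*(n-r)+[q+1]*r.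
import Mathlib
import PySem

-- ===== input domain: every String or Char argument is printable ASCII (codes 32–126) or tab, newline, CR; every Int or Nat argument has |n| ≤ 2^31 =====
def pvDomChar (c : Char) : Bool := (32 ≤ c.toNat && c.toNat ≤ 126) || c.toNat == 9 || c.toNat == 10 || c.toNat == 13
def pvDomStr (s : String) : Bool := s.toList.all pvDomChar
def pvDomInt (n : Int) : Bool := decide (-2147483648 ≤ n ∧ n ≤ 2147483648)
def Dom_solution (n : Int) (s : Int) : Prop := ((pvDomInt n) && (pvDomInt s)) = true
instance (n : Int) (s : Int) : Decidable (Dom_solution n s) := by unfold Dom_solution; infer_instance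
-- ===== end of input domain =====

-- B builds the answer from one divmod as two constant runs instead of A's per-step division loop (objective: simpler).


-- ===== PORT A =====
-- the 'while n:' loop; the 0 < n guard makes it total (Python diverges for n < 0, excluded by Pre_)
def solutionLoop (n : Int) (s : Int) (acc : List Int) : List Int :=
  if 0 < n then
    solutionLoop (n - 1) (s - PySem.Int.floordiv s n) (acc ++ [PySem.Int.floordiv s n])
  else acc
termination_by n.toNat
decreasing_by omega

def solution (n : Int) (s : Int) : List Int :=
  if s < n then [-1]
  else solutionLoop n s []

-- ===== PORT B =====
def solution_alt (n : Int) (s : Int) : List Int :=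
  if s < n then [-1]
  else if n = 0 then []
  else
    List.replicate (n - PySem.Int.mod s n).toNat (PySem.Int.floordiv s n) ++
    List.replicate (PySem.Int.mod s n).toNat (PySem.Int.floordiv s n + 1)

-- ===== PRECONDITION & SPEC =====
-- Pre_ excludes only n < 0 ∧ s ≥ n, where A's 'while n' loop never terminates (n decreases past 0).
def Pre_solution (n : Int) (s : Int) : Prop := 0 ≤ n ∨ s < n
instance (n : Int) (s : Int) : Decidable (Pre_solution n s) := by unfold Pre_solution; infer_instance
def pvWitness_solution : Int × Int := (5, 17)

def Spec_solution (n : Int) (s : Int) (out : List Int) : Prop := out = solution_alt n s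
instance (n : Int) (s : Int) (out : List Int) : Decidable (Spec_solution n s out) := by unfold Spec_solution; infer_instance

-- ===== CLAIM (what is proved, stated in full; the proofs are below) =====
def Claim_equal_solution : Prop := ∀ (n : Int) (s : Int), Dom_solution n s → Pre_solution n s → Spec_solution n s (solution n s)

-- ===== LEMMAS AND PROOFS =====

lemma loop_general : ∀ (m : Nat) (q r : Int) (acc : List Int), 0 ≤ r → r < (m : Int) →
    solutionLoop (m : Int) (q * m + r) acc
      = acc ++ List.replicate (m - r.toNat) q ++ List.replicate r.toNat (q + 1) := by
  intro m
  induction m with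
  | zero => intro q r acc h0 h1; omega
  | succ m ih =>
    intro q r acc h0 h1
    have hb : (0:Int) < ((m+1 : Nat) : Int) := by push_cast; omega
    have hq : PySem.Int.floordiv (q * ((m+1:Nat):Int) + r) ((m+1:Nat):Int) = q := by
      rw [PySem.Int.floordiv_eq_iff_of_pos hb]
      constructor
      · linarith
      · push_cast at h1 ⊢; nlinarith
    rw [solutionLoop, if_pos hb, hq]
    have hs' : q * ((m+1:Nat):Int) + r - q = q * (m:Int) + r := by push_cast; ring
    have hn' : ((m+1:Nat):Int) - 1 = (m:Int) := by push_cast; ring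
    rw [hs', hn']
    by_cases hm : m = 0
    · subst hm
      have hr : r = 0 := by simp at h1; omega
      subst hr
      rw [solutionLoop]
      simp
    · by_cases hrm : r < (m:Int)
      · rw [ih q r (acc ++ [q]) h0 hrm]
        have hle : r.toNat ≤ m := by omega
        have : (m + 1) - r.toNat = ((m - r.toNat) + 1) := by omega
        rw [this, List.replicate_succ]
        simp
      · have hr : r = (m:Int) := by omega
        subst hr
        have h2 : q * (m:Int) + (m:Int) = (q+1) * (m:Int) + 0 := by ring
        rw [h2, ih (q+1) 0 (acc ++ [q]) le_rfl (by exact_mod_cast Nat.pos_of_ne_zero hm)]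
        have : (m + 1) - ((m:Int)).toNat = 1 := by omega
        rw [this]
        simp

-- ===== VERDICT (by name: the statement is the Claim_ definition above) =====
theorem solution_spec : Claim_equal_solution := by
  intro n s _ hpre
  unfold Spec_solution solution solution_alt
  by_cases hs : s < n
  · simp [hs]
  · simp only [hs, if_false]
    have hn : 0 ≤ n := hpre.resolve_right hs
    by_cases hn0 : n = 0
    · subst hn0
      rw [solutionLoop]
      simp
    · have hnpos : 0 < n := lt_of_le_of_ne hn (Ne.symm hn0)
      simp only [hn0, if_false]
      set q := PySem.Int.floordiv s n with hq
      set r := PySem.Int.mod s n with hr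
      have hsum : q * n + r = s := PySem.Int.floordiv_mul_add_mod s n
      have hr0 : 0 ≤ r := PySem.Int.mod_nonneg s hnpos
      have hrlt : r < n := PySem.Int.mod_lt s hnpos
      have hcast : ((n.toNat : Nat) : Int) = n := Int.toNat_of_nonneg hn
      have := loop_general n.toNat q r [] hr0 (by rw [hcast]; exact hrlt)
      rw [hcast] at this
      rw [hsum] at this
      rw [this]
      have h1 : (n - r).toNat = n.toNat - r.toNat := by omega
      rw [h1]
      simp
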